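-- pv_equiv track=rewrite | github.com/02heng/AI-writer | backend/app/scene_writer.py | merge_scenes_to_chapter
-- ===== SOURCE A (Python) =====
-- def merge_scenes_to_chapter(
--     scene_texts: list[str],
--     add_transitions: bool = True,
-- ) -> str:
--     """Merge scene texts into a complete chapter.
--
--     Args:
--         scene_texts: List of scene text strings
--         add_transitions: Whether to add transition hints between scenes
--
--     Returns:
--         Merged chapter text
--     """
--     if not scene_texts:
--         return ""
--
--     if len(scene_texts) == 1:
--         return scene_texts[0]
--
--     # Simple merge with paragraph break
--     merged = "\n\n".join(scene_texts)
--
--     # Clean up any double paragraph breaks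
--     while "\n\n\n" in merged:
--         merged = merged.replace("\n\n\n", "\n\n")
--
--     return merged.strip()
-- ===== SOURCE B (Python) =====
-- def merge_scenes_to_chapter(
--     scene_texts: list[str],
--     add_transitions: bool = True,
-- ) -> str:
--     """Merge scene texts into a complete chapter (single-pass newline collapse)."""
--     if not scene_texts:
--         return ""
--
--     if len(scene_texts) == 1:
--         return scene_texts[0]
--
--     merged = "\n\n".join(scene_texts)
--
--     # One forward pass: emit at most two '\n' per run of consecutive newlines.
--     out = []
--     run = 0
--     for ch in merged:
--         if ch == "\n":
--             if run < 2:
--                 out.append(ch)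
--                 run += 1
--         else:
--             out.append(ch)
--             run = 0
--
--     return "".join(out).strip()
-- ===== Notes on version B (the rewrite author's own statement) =====
-- stated objective: alternative
-- what changed: A reaches a fixpoint by repeatedly calling replace("\n\n\n", "\n\n") inside a while-in loop; B makes one forward pass over the joined string, emitting at most two newlines per run of consecutive newlines.
import Mathlib
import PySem

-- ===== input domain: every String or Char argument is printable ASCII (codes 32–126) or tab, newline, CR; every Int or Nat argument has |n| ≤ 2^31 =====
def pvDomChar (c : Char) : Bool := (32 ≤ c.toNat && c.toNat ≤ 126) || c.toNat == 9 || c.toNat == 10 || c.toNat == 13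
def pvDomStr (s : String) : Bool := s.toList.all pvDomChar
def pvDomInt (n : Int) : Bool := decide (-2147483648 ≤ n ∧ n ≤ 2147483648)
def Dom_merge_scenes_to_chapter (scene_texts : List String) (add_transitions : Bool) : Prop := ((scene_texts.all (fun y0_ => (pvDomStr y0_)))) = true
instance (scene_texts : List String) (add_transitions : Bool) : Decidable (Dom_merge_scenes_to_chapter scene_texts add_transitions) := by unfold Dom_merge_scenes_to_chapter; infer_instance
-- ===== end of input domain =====

-- B replaces A's repeated replace("\n\n\n","\n\n") fixpoint loop by a single forward
-- pass that caps each run of consecutive newlines at two (objective: single-pass alternative).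


-- ===== PORT A =====
def nl3 : List Char := ['\n', '\n', '\n']
def nl2 : List Char := ['\n', '\n']

-- one while-loop iteration of A: merged = merged.replace("\n\n\n", "\n\n").
-- The loop runs while "\n\n\n" is in merged; each iteration shortens the string,
-- so fuel = initial length makes the SAME computation total (proved exact below).
def loopAFuel : Nat → List Char → List Char
  | 0, cs => cs
  | fuel + 1, cs =>
      if PySem.Chars.isIn nl3 cs then loopAFuel fuel (PySem.Chars.replace cs nl3 nl2) else cs

def loopA (cs : List Char) : List Char := loopAFuel cs.length cs

def merge_scenes_to_chapter (scene_texts : List String) (add_transitions : Bool) : String :=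
  if scene_texts.isEmpty then ""
  else if scene_texts.length = 1 then (PySem.List.pyGet? scene_texts 0).getD ""
  else
    let merged := (PySem.Str.join "\n\n" scene_texts).toList
    String.mk (PySem.Chars.strip (loopA merged))

-- ===== PORT B =====
-- the single forward pass of Source B: run = newlines emitted in the current run (capped at 2)
def collapse : Nat → List Char → List Char
  | _, [] => []
  | run, c :: t =>
      if c = '\n' then
        if run < 2 then c :: collapse (run + 1) t else collapse run t
      else c :: collapse 0 t

def merge_scenes_to_chapter_alt (scene_texts : List String) (add_transitions : Bool) : String :=
  if scene_texts.isEmpty then ""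
  else if scene_texts.length = 1 then (PySem.List.pyGet? scene_texts 0).getD ""
  else
    let merged := (PySem.Str.join "\n\n" scene_texts).toList
    String.mk (PySem.Chars.strip (collapse 0 merged))

-- ===== PRECONDITION & SPEC =====
def Spec_merge_scenes_to_chapter (scene_texts : List String) (add_transitions : Bool) (out : String) : Prop := out = merge_scenes_to_chapter_alt scene_texts add_transitions
instance (scene_texts : List String) (add_transitions : Bool) (out : String) : Decidable (Spec_merge_scenes_to_chapter scene_texts add_transitions out) := by unfold Spec_merge_scenes_to_chapter; infer_instance

-- ===== CLAIM (what is proved, stated in full; the proofs are below) =====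
def Claim_equal_merge_scenes_to_chapter : Prop := ∀ (scene_texts : List String) (add_transitions : Bool), Dom_merge_scenes_to_chapter scene_texts add_transitions → Spec_merge_scenes_to_chapter scene_texts add_transitions (merge_scenes_to_chapter scene_texts add_transitions)

-- ===== LEMMAS AND PROOFS =====

-- one left-to-right pass of Python's merged.replace("\n\n\n", "\n\n")
def rep : List Char → List Char
  | '\n' :: '\n' :: '\n' :: t => '\n' :: '\n' :: rep t
  | c :: t => c :: rep t
  | [] => []

theorem triple_shape (c : Char) (t : List Char) (hp : nl3.isPrefixOf (c :: t) = true) :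
    c = '\n' ∧ t = '\n' :: '\n' :: t.drop 2 := by
  rcases List.isPrefixOf_iff_prefix.mp hp with ⟨s, hs⟩
  simp [nl3] at hs
  refine ⟨hs.1.symm, ?_⟩
  rw [← hs.2]
  simp

theorem rep_step (c : Char) (t : List Char) :
    rep (c :: t) = if nl3.isPrefixOf (c :: t) then nl2 ++ rep (t.drop 2) else c :: rep t := by
  by_cases hp : nl3.isPrefixOf (c :: t) = true
  · obtain ⟨rfl, ht⟩ := triple_shape c t hp
    rw [if_pos hp]
    conv_lhs => rw [ht]
    rw [ht]
    simp [rep, nl2]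
  · rw [if_neg hp]
    rw [rep.eq_def]
    split
    · rename_i t' heq
      exfalso
      apply hp
      injection heq with h1 h2
      subst h1; subst h2
      simp [nl3, List.isPrefixOf]
    · rename_i c' t' hne heq
      injection heq with h1 h2
      subst h1; subst h2
      rfl
    · rename_i heq; exact absurd heq (by simp)

theorem rep_len_le_aux (n : Nat) : ∀ l : List Char, l.length ≤ n → (rep l).length ≤ l.length := by
  induction n with
  | zero =>
      intro l hl
      have hnil : l = [] := List.eq_nil_of_length_eq_zero (Nat.le_zero.mp hl)
      subst hnil; simp [rep]
  | succ m ih =>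
      intro l hl
      cases l with
      | nil => simp [rep]
      | cons c t =>
          rw [rep_step]
          by_cases hp : nl3.isPrefixOf (c :: t) = true
          · rw [if_pos hp]
            obtain ⟨rfl, ht⟩ := triple_shape c t hp
            have hs : (t.drop 2).length + 3 = ('\n' :: t).length := by
              conv_rhs => rw [ht]
              simp
            have hrec := ih (t.drop 2) (by simp only [List.length_cons] at hl hs ⊢; omega)
            simp only [nl2, List.length_append, List.length_cons, List.length_nil] at hs ⊢
            omega
          · rw [if_neg hp]
            have hrec := ih t (by simp only [List.length_cons] at hl; omega)
            simp only [List.length_cons]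
            omega

theorem rep_len_le (l : List Char) : (rep l).length ≤ l.length :=
  rep_len_le_aux l.length l le_rfl

theorem rep_len_lt_aux (n : Nat) : ∀ l : List Char, l.length ≤ n → nl3 <:+: l →
    (rep l).length < l.length := by
  induction n with
  | zero =>
      intro l hl hinf
      have hnil : l = [] := List.eq_nil_of_length_eq_zero (Nat.le_zero.mp hl)
      subst hnil
      exact absurd (List.eq_nil_of_infix_nil hinf) (by simp [nl3])
  | succ m ih =>
      intro l hl hinf
      cases l with
      | nil => exact absurd (List.eq_nil_of_infix_nil hinf) (by simp [nl3])
      | cons c t =>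
          rw [rep_step]
          by_cases hp : nl3.isPrefixOf (c :: t) = true
          · rw [if_pos hp]
            obtain ⟨rfl, ht⟩ := triple_shape c t hp
            have hs : (t.drop 2).length + 3 = ('\n' :: t).length := by
              conv_rhs => rw [ht]
              simp
            have hrec := rep_len_le (t.drop 2)
            simp only [nl2, List.length_append, List.length_cons, List.length_nil] at hs ⊢
            omega
          · rw [if_neg hp]
            have ht : nl3 <:+: t := by
              rcases List.infix_cons_iff.mp hinf with h' | h'
              · exact absurd (List.isPrefixOf_iff_prefix.mpr h') (by simp [hp])
              · exact h'
            have hrec := ih t (by simp only [List.length_cons] at hl; omega) ht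
            simp only [List.length_cons]
            omega

theorem rep_len_lt (l : List Char) (h : nl3 <:+: l) : (rep l).length < l.length :=
  rep_len_lt_aux l.length l le_rfl h

theorem replace_go_eq (fuel : Nat) : ∀ (l acc : List Char), l.length ≤ fuel →
    PySem.Chars.replace.go nl3 nl2 fuel l acc = acc.reverse ++ rep l := by
  induction fuel with
  | zero =>
      intro l acc hl
      have hnil : l = [] := List.eq_nil_of_length_eq_zero (Nat.le_zero.mp hl)
      subst hnil; simp [PySem.Chars.replace.go, rep]
  | succ f ih =>
      intro l acc hl
      match l with
      | [] => simp [PySem.Chars.replace.go, rep]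
      | c :: t =>
          rw [PySem.Chars.replace.go]
          by_cases hp : nl3.isPrefixOf (c :: t)
          · rw [if_pos hp, rep_step, if_pos hp]
            have hlen : ((c :: t).drop nl3.length).length ≤ f := by
              have h3 : nl3.length = 3 := rfl
              have hd := List.length_drop (l := c :: t) (i := 3)
              rw [h3]
              simp only [List.length_cons] at hd hl ⊢
              omega
            rw [ih _ _ hlen]
            simp [nl3, List.drop_succ_cons]
          · rw [if_neg hp, rep_step, if_neg hp]
            have hlen : t.length ≤ f := by simp only [List.length_cons] at hl; omega
            rw [ih _ _ hlen]
            simp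

theorem replace_eq (l : List Char) : PySem.Chars.replace l nl3 nl2 = rep l := by
  rw [PySem.Chars.replace]
  have hne : nl3.isEmpty = false := by simp [nl3]
  rw [if_neg (by simp [hne])]
  simpa using replace_go_eq l.length l [] le_rfl

-- collapsing a triple newline to a double one does not change the collapse result
theorem collapse_triple (k : Nat) (xs : List Char) :
    collapse k ('\n' :: '\n' :: '\n' :: xs) = collapse k ('\n' :: '\n' :: xs) := by
  rcases k with _ | _ | k <;> simp [collapse]

theorem collapse_rep_aux (n : Nat) : ∀ l : List Char, l.length ≤ n → ∀ k,
    collapse k (rep l) = collapse k l := by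
  induction n with
  | zero =>
      intro l hl k
      have hnil : l = [] := List.eq_nil_of_length_eq_zero (Nat.le_zero.mp hl)
      subst hnil; simp [rep]
  | succ m ih =>
      intro l hl k
      cases l with
      | nil => simp [rep]
      | cons c t =>
          rw [rep_step]
          by_cases hp : nl3.isPrefixOf (c :: t) = true
          · rw [if_pos hp]
            obtain ⟨rfl, ht⟩ := triple_shape c t hp
            have hs : (t.drop 2).length + 3 = ('\n' :: t).length := by
              conv_rhs => rw [ht]
              simp
            have hrec := ih (t.drop 2) (by simp only [List.length_cons] at hl hs; omega)
            conv_rhs => rw [ht]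
            rw [collapse_triple]
            rcases k with _ | _ | k <;> simp [collapse, nl2, hrec]
          · rw [if_neg hp]
            have hrec := ih t (by simp only [List.length_cons] at hl; omega)
            by_cases hc : c = '\n'
            · subst hc
              by_cases hk : k < 2 <;> simp [collapse, hk, hrec]
            · simp [collapse, hc, hrec]

theorem collapse_rep (l : List Char) (k : Nat) : collapse k (rep l) = collapse k l :=
  collapse_rep_aux l.length l le_rfl k

-- a string with no triple newline is a fixpoint of the collapse pass
theorem collapse_id_gen (l : List Char) :
    ∀ k, ¬ (nl3 <:+: (List.replicate k '\n' ++ l)) → collapse k l = l := by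
  induction l with
  | nil => intro k _; simp [collapse]
  | cons c t ih =>
      intro k h
      by_cases hc : c = '\n'
      · subst hc
        by_cases hk : k < 2
        · have h' : ¬ (nl3 <:+: (List.replicate (k + 1) '\n' ++ t)) := by
            rw [List.replicate_succ']
            simpa [List.append_assoc] using h
          simp [collapse, hk, ih (k + 1) h']
        · exfalso
          apply h
          have e1 : List.replicate k '\n' ++ '\n' :: t = List.replicate (k + 1) '\n' ++ t := by
            rw [List.replicate_succ']; simp
          have e2 : List.replicate (k + 1) '\n' = nl3 ++ List.replicate (k - 2) '\n' := by
            have h31 : k + 1 = 3 + (k - 2) := by omega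
            rw [h31, List.replicate_add]; rfl
          rw [e1, e2, List.append_assoc]
          exact (List.prefix_append _ _).isInfix
      · have ht : t <:+ List.replicate k '\n' ++ c :: t :=
          (List.suffix_cons c t).trans (List.suffix_append _ _)
        have h' : ¬ (nl3 <:+: t) := fun hinf => h (hinf.trans ht.isInfix)
        simp [collapse, hc, ih 0 (by simpa using h')]

theorem loopAFuel_eq (fuel : Nat) : ∀ cs : List Char, cs.length ≤ fuel →
    loopAFuel fuel cs = collapse 0 cs := by
  induction fuel with
  | zero =>
      intro cs hl
      have hnil : cs = [] := List.eq_nil_of_length_eq_zero (Nat.le_zero.mp hl)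
      subst hnil; simp [loopAFuel, collapse]
  | succ f ih =>
      intro cs hl
      rw [loopAFuel]
      by_cases h : PySem.Chars.isIn nl3 cs = true
      · rw [if_pos h]
        have hinf : nl3 <:+: cs := (PySem.Chars.isIn_iff_infix nl3 cs).mp h
        have hlt : (PySem.Chars.replace cs nl3 nl2).length < cs.length := by
          rw [replace_eq]; exact rep_len_lt cs hinf
        rw [ih _ (by omega), replace_eq, collapse_rep]
      · rw [if_neg h]
        have hni : ¬ (nl3 <:+: cs) := fun hinf => h ((PySem.Chars.isIn_iff_infix nl3 cs).mpr hinf)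
        exact (collapse_id_gen cs 0 (by simpa using hni)).symm

theorem loopA_eq (cs : List Char) : loopA cs = collapse 0 cs :=
  loopAFuel_eq cs.length cs le_rfl

-- ===== VERDICT (by name: the statement is the Claim_ definition above) =====
theorem merge_scenes_to_chapter_spec : Claim_equal_merge_scenes_to_chapter := by
  intro scene_texts add_transitions _
  unfold Spec_merge_scenes_to_chapter merge_scenes_to_chapter merge_scenes_to_chapter_alt
  split_ifs with h1 h2
  · rfl
  · rfl
  · simp only [loopA_eq]
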